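-- pv_equiv track=rewrite | github.com/jakubtuchol/dailycodingproblem | src/ten.py | autocomplete
-- ===== SOURCE A (Python) =====
-- def autocomplete(corpus, prefix):
--     """
--     Given a text corpus and a prefix, return a list
--     of all words that start with that prefix
--     """
--     class Trie:
--         def __init__(self, value):
--             self.value = value
--             self.children = {}
--             # allows for quick access of resulting words,
--             # rather than having cumbersome traversal
--             self.words = []
--
--     if not len(prefix):
--         return corpus
--
--     # construct trie
--     root = Trie('')
--     for word in corpus:
--         cur = root
--         cur.words.append(word)
--         for char in word:
--             if char not in cur.children:
--                 cur.children[char] = Trie(char)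
--             cur = cur.children[char]
--             cur.words.append(word)
--
--     for char in prefix:
--         if char in root.children:
--             root = root.children[char]
--         else:
--             return []
--
--     return root.words
-- ===== SOURCE B (Python) =====
-- def autocomplete(corpus, prefix):
--     """
--     Given a text corpus and a prefix, return a list
--     of all words that start with that prefix
--     """
--     if not len(prefix):
--         return corpus
--     return [word for word in corpus if word.startswith(prefix)]
-- ===== Notes on version B (the rewrite author's own statement) =====
-- stated objective: simpler
-- what changed: Replaces the per-word trie construction (mutable nodes each carrying a words list) plus trie descent with a single linear filter of the corpus by str.startswith; the empty-prefix guard returning the corpus is kept.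
import Mathlib
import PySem

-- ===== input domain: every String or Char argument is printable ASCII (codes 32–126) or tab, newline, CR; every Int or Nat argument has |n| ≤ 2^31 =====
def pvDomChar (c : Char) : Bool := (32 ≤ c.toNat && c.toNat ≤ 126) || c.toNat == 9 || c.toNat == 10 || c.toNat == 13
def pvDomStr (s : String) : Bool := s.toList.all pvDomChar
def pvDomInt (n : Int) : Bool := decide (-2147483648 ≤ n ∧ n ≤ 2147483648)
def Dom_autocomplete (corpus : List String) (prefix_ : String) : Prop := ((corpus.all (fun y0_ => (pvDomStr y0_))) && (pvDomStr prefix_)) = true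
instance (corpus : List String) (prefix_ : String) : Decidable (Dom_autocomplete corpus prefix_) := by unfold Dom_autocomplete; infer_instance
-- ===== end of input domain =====

-- B replaces A's trie construction with one linear filter by startswith; return values proved equal.

-- ===== PORT A =====
-- The Python Trie objects form a tree (each node is reachable through exactly one
-- parent dict entry, so there is no aliasing); we model the heap of Trie objects by a
-- mutual inductive: PTrie = one node (value, children dict, words list), PChildren =
-- the children dict as an insertion-ordered association structure (a plain
-- List (Char × PTrie) would be a nested inductive, which is not allowed).
mutual
inductive PTrie where
  | mk (value : String) (children : PChildren) (words : List String) : PTrie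
inductive PChildren where
  | nil : PChildren
  | cons (c : Char) (t : PTrie) (rest : PChildren) : PChildren
end

def PTrie.value' : PTrie → String | .mk v _ _ => v
def PTrie.children' : PTrie → PChildren | .mk _ ch _ => ch
def PTrie.words' : PTrie → List String | .mk _ _ ws => ws

-- dict lookup: first (= only) matching key
def PChildren.find? : PChildren → Char → Option PTrie
  | .nil, _ => none
  | .cons d t rest, c => if d = c then some t else rest.find? c

-- dict write children[c] = t: overwrite in place, or append a new key at the end
def PChildren.set : PChildren → Char → PTrie → PChildren
  | .nil, c, t => .cons c t .nil
  | .cons d u rest, c, t => if d = c then .cons d t rest else .cons d u (rest.set c t)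

-- inner loop 'for char in word': fetch-or-create the child, append word to its
-- words, continue from it; the functional update replaces the Python in-place mutation
def insertChars (t : PTrie) (word : String) : List Char → PTrie
  | [] => t
  | c :: cs =>
    let child0 := match t.children'.find? c with
      | some u => u
      | none => PTrie.mk (String.ofList [c]) .nil []
    let child1 := PTrie.mk child0.value' child0.children' (child0.words' ++ [word])
    let child2 := insertChars child1 word cs
    PTrie.mk t.value' (t.children'.set c child2) t.words'

-- body of 'for word in corpus': cur = root; cur.words.append(word); inner loop
def insertWord (t : PTrie) (word : String) : PTrie :=
  insertChars (PTrie.mk t.value' t.children' (t.words' ++ [word])) word word.toList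

-- 'for char in prefix': descend, None = the early 'return []'
def descend : PTrie → List Char → Option PTrie
  | t, [] => some t
  | t, c :: cs =>
    match t.children'.find? c with
    | some u => descend u cs
    | none => none

def autocomplete (corpus : List String) (prefix_ : String) : List String :=
  if PySem.Str.len prefix_ = 0 then corpus
  else
    let root := corpus.foldl insertWord (PTrie.mk "" .nil [])
    match descend root prefix_.toList with
    | some t => t.words'
    | none => []

-- ===== PORT B =====
def autocomplete_alt (corpus : List String) (prefix_ : String) : List String :=
  if PySem.Str.len prefix_ = 0 then corpus
  else corpus.filter (fun word => PySem.Str.startswith word prefix_)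

-- ===== PRECONDITION & SPEC =====
def Spec_autocomplete (corpus : List String) (prefix_ : String) (out : List String) : Prop := out = autocomplete_alt corpus prefix_
instance (corpus : List String) (prefix_ : String) (out : List String) : Decidable (Spec_autocomplete corpus prefix_ out) := by unfold Spec_autocomplete; infer_instance

-- ===== CLAIM (what is proved, stated in full; the proofs are below) =====
def Claim_equal_autocomplete : Prop := ∀ (corpus : List String) (prefix_ : String), Dom_autocomplete corpus prefix_ → Spec_autocomplete corpus prefix_ (autocomplete corpus prefix_)

-- ===== LEMMAS AND PROOFS =====

-- the words stored at the node reached by path p ([] if the path is absent)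
def wordsAt (t : PTrie) (p : List Char) : List String :=
  match descend t p with
  | some u => u.words'
  | none => []

theorem find?_set (ch : PChildren) (c c' : Char) (t : PTrie) :
    (ch.set c t).find? c' = if c = c' then some t else ch.find? c' := by
  match ch with
  | .nil => simp [PChildren.set, PChildren.find?]
  | .cons d u rest =>
    have ih := find?_set rest c c' t
    by_cases hdc : d = c
    · subst hdc
      by_cases hcc : d = c' <;> simp [PChildren.set, PChildren.find?, hcc]
    · by_cases hdc' : d = c'
      · subst hdc'
        simp [PChildren.set, PChildren.find?, hdc, Ne.symm hdc]
      · simp [PChildren.set, PChildren.find?, hdc, hdc', ih]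

theorem words'_insertChars (t : PTrie) (w : String) (cs : List Char) :
    (insertChars t w cs).words' = t.words' := by
  cases cs <;> simp [insertChars, PTrie.words']

-- the fetch-or-create child of the first inner-loop step, as a named term
def child0 (t : PTrie) (d : Char) : PTrie :=
  match t.children'.find? d with
  | some u => u
  | none => PTrie.mk (String.ofList [d]) PChildren.nil []

theorem insertChars_cons (v : String) (ch : PChildren) (ws : List String)
    (w : String) (d : Char) (cs' : List Char) :
    insertChars (PTrie.mk v ch ws) w (d :: cs')
      = PTrie.mk v
          (ch.set d
            (insertChars
              (PTrie.mk (child0 (PTrie.mk v ch ws) d).value'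
                (child0 (PTrie.mk v ch ws) d).children'
                ((child0 (PTrie.mk v ch ws) d).words' ++ [w])) w cs'))
          ws := rfl

theorem wordsAt_nil (t : PTrie) : wordsAt t [] = t.words' := rfl

theorem wordsAt_cons (v : String) (ch : PChildren) (ws : List String) (c : Char) (p : List Char) :
    wordsAt (PTrie.mk v ch ws) (c :: p)
      = ((ch.find? c).map (fun u => wordsAt u p)).getD [] := by
  cases h : ch.find? c <;> simp [wordsAt, descend, PTrie.children', h]

theorem wordsAt_insertChars (p : List Char) : ∀ (t : PTrie) (cs : List Char) (w : String),
    p ≠ [] →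
    wordsAt (insertChars t w cs) p = wordsAt t p ++ (if p <+: cs then [w] else []) := by
  induction p with
  | nil => intro _ _ _ h; exact absurd rfl h
  | cons c p' ih =>
    intro t cs w _
    obtain ⟨v, ch, ws⟩ := t
    cases cs with
    | nil =>
      have : ¬ (c :: p' <+: ([] : List Char)) := by simp
      simp [insertChars, this]
    | cons d cs' =>
      rw [insertChars_cons, wordsAt_cons, find?_set, wordsAt_cons]
      by_cases hdc : d = c
      · subst hdc
        rw [if_pos rfl]
        cases hf : ch.find? d with
        | none =>
          have hc0 : child0 (PTrie.mk v ch ws) d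
              = PTrie.mk (String.ofList [d]) PChildren.nil [] := by
            simp [child0, PTrie.children', hf]
          rw [hc0]
          simp only [PTrie.value', PTrie.children', PTrie.words', List.nil_append,
            Option.map_some, Option.getD_some, Option.map_none, Option.getD_none]
          cases p' with
          | nil =>
            rw [wordsAt_nil, words'_insertChars]
            simp [PTrie.words', List.cons_prefix_cons]
          | cons e p'' =>
            rw [ih (PTrie.mk (String.ofList [d]) PChildren.nil [w]) cs' w (by simp),
              wordsAt_cons]
            simp [PChildren.find?, List.cons_prefix_cons]
        | some u =>
          obtain ⟨uv, uch, uws⟩ := u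
          have hc0 : child0 (PTrie.mk v ch ws) d = PTrie.mk uv uch uws := by
            simp [child0, PTrie.children', hf]
          rw [hc0]
          simp only [PTrie.value', PTrie.children', PTrie.words',
            Option.map_some, Option.getD_some]
          cases p' with
          | nil =>
            rw [wordsAt_nil, words'_insertChars, wordsAt_nil]
            simp [PTrie.words', List.cons_prefix_cons]
          | cons e p'' =>
            rw [ih (PTrie.mk uv uch (uws ++ [w])) cs' w (by simp),
              wordsAt_cons, wordsAt_cons]
            simp [List.cons_prefix_cons]
      · rw [if_neg hdc]
        have hpre : ¬ (c :: p' <+: d :: cs') := by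
          intro h
          exact hdc (by simpa using (List.cons_prefix_cons.mp h).1.symm)
        simp [hpre]

theorem wordsAt_insertWord (t : PTrie) (w : String) (p : List Char) (hp : p ≠ []) :
    wordsAt (insertWord t w) p = wordsAt t p ++ (if p <+: w.toList then [w] else []) := by
  obtain ⟨v, ch, ws⟩ := t
  cases p with
  | nil => exact absurd rfl hp
  | cons c p' =>
    rw [insertWord]
    simp only [PTrie.value', PTrie.children', PTrie.words']
    rw [wordsAt_insertChars _ _ _ _ hp, wordsAt_cons, wordsAt_cons]

theorem wordsAt_foldl (ws : List String) : ∀ (t : PTrie) (p : List Char), p ≠ [] →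
    wordsAt (ws.foldl insertWord t) p
      = wordsAt t p ++ ws.filter (fun w => decide (p <+: w.toList)) := by
  induction ws with
  | nil => intro t p _; simp
  | cons w ws ih =>
    intro t p hp
    rw [List.foldl_cons, ih _ _ hp, wordsAt_insertWord _ _ _ hp]
    by_cases h : p <+: w.toList <;> simp [h]

theorem startswith_eq_decide (w p : String) :
    PySem.Str.startswith w p = decide (p.toList <+: w.toList) := by
  simp only [PySem.Str.startswith_eq]
  rcases hb : PySem.Chars.startswith w.toList p.toList with _ | _
  · symm
    simp only [decide_eq_false_iff_not]
    intro hp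
    rw [(PySem.Chars.startswith_iff w.toList p.toList).mpr hp] at hb
    cases hb
  · symm
    simp only [decide_eq_true_eq]
    exact (PySem.Chars.startswith_iff w.toList p.toList).mp hb

-- ===== VERDICT (by name: the statement is the Claim_ definition above) =====
theorem autocomplete_spec : Claim_equal_autocomplete := by
  intro corpus prefix_ _
  unfold Spec_autocomplete autocomplete autocomplete_alt
  by_cases h : PySem.Str.len prefix_ = 0
  · rw [if_pos h, if_pos h]
  · rw [if_neg h, if_neg h]
    have hp : prefix_.toList ≠ [] := by
      intro hnil
      apply h
      simp [PySem.Str.len_eq, hnil]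
    have hroot := wordsAt_foldl corpus (PTrie.mk "" PChildren.nil []) prefix_.toList hp
    have hempty : wordsAt (PTrie.mk "" PChildren.nil []) prefix_.toList = [] := by
      cases hc : prefix_.toList with
      | nil => exact absurd hc hp
      | cons c cs => simp [wordsAt, descend, PTrie.children', PChildren.find?]
    rw [hempty, List.nil_append] at hroot
    have hfil : (corpus.filter fun word => PySem.Str.startswith word prefix_)
        = corpus.filter (fun w => decide (prefix_.toList <+: w.toList)) := by
      apply List.filter_congr
      intro w _
      rw [startswith_eq_decide]
    rw [hfil, ← hroot]
    simp only [wordsAt]
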